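-- pv_equiv track=rewrite | github.com/ABNER-1/fastsafetensor_3fs_reader | hack/benchmark/benchmark_worker.py | assign_files_to_processes
-- ===== SOURCE A (Python) =====
-- from typing import Dict, List, Any
--
-- def assign_files_to_processes(
--     files: List[str], num_processes: int
-- ) -> List[List[str]]:
--     """Distribute *files* across *num_processes* workers using a stride pattern.
--
--     Example::
--
--         files = [f0, f1, f2, f3, f4, f5, f6, f7]
--         num_processes = 3
--         -> [[f0, f3, f6], [f1, f4, f7], [f2, f5]]
--     """
--     process_files: List[List[str]] = []
--     for rank in range(num_processes):
--         rank_files = [files[i] for i in range(rank, len(files), num_processes)]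
--         if rank_files:
--             process_files.append(rank_files)
--     return process_files
-- ===== SOURCE B (Python) =====
-- def assign_files_to_processes(files, num_processes):
--     if num_processes <= 0:
--         return []
--     buckets = [[] for _ in range(num_processes)]
--     for i, f in enumerate(files):
--         buckets[i % num_processes].append(f)
--     return [b for b in buckets if b]
-- ===== Notes on version B (the rewrite author's own statement) =====
-- stated objective: alternative
-- what changed: One file-major pass appending each file to bucket i % num_processes (with empty buckets filtered at the end), instead of A's per-rank stride index scans; num_processes <= 0 returns [] up front like A's empty outer loop.
import Mathlib
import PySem

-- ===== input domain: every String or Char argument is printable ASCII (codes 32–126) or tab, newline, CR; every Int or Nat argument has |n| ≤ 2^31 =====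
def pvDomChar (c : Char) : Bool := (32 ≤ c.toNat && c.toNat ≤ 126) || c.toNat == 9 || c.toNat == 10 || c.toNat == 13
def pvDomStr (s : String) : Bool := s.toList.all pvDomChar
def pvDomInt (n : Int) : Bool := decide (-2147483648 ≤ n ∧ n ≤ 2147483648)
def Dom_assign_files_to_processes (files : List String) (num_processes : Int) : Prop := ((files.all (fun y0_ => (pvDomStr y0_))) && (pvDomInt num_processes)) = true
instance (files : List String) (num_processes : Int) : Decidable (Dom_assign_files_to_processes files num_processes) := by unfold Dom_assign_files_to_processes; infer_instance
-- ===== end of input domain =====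

-- B rewrites A's per-rank stride scans as one file-major pass into modulo buckets (alternative decomposition, same cost).

-- ===== PORT A =====
-- literal port of A: for each rank in range(num_processes), collect files[rank::num_processes], append if non-empty.
-- files[i] is ported as pyGetD with default "": every i produced by range(rank, len(files), num_processes) is in range.
def assign_files_to_processes (files : List String) (num_processes : Int) : List (List String) :=
  (PySem.List.pyRange 0 num_processes 1).foldl
    (fun acc rank =>
      let rank_files := (PySem.List.pyRange rank (PySem.List.len files) num_processes).map
        (fun i => PySem.List.pyGetD files i "")
      if rank_files ≠ [] then acc ++ [rank_files] else acc)
    []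

-- ===== PORT B =====
-- port of Source B: guard non-positive num_processes, then one pass over enumerate(files) appending to bucket i % num_processes.
def assign_files_to_processes_alt (files : List String) (num_processes : Int) : List (List String) :=
  if num_processes ≤ 0 then []
  else
    let buckets := List.replicate num_processes.toNat ([] : List String)
    let buckets := (PySem.List.enumerate files).foldl
      (fun bs p => bs.modify (PySem.Int.mod p.1 num_processes).toNat (fun b => b ++ [p.2])) buckets
    buckets.filter (fun b => !b.isEmpty)

-- ===== PRECONDITION & SPEC =====
def Spec_assign_files_to_processes (files : List String) (num_processes : Int) (out : List (List String)) : Prop := out = assign_files_to_processes_alt files num_processes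
instance (files : List String) (num_processes : Int) (out : List (List String)) : Decidable (Spec_assign_files_to_processes files num_processes out) := by unfold Spec_assign_files_to_processes; infer_instance

-- ===== CLAIM (what is proved, stated in full; the proofs are below) =====
def Claim_equal_assign_files_to_processes : Prop := ∀ (files : List String) (num_processes : Int), Dom_assign_files_to_processes files num_processes → Spec_assign_files_to_processes files num_processes (assign_files_to_processes files num_processes)

-- ===== LEMMAS AND PROOFS =====

-- the files an inner scan / a bucket ends with: elements of xs whose (absolute) position s+k is ≡ j (mod n)
def pvContrib (n : Nat) : List String → Nat → Nat → List String
  | [], _, _ => []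
  | x :: xs, s, j => (if s % n = j then [x] else []) ++ pvContrib n xs (s + 1) j

theorem pvContrib_snoc (n : Nat) (xs : List String) (x : String) (s j : Nat) :
    pvContrib n (xs ++ [x]) s j = pvContrib n xs s j ++ (if (s + xs.length) % n = j then [x] else []) := by
  induction xs generalizing s with
  | nil => simp [pvContrib]
  | cons y ys ih => simp [pvContrib, ih (s + 1), Nat.add_assoc, Nat.add_comm 1 ys.length]

-- the Int index list range(r, len, n) equals the Nat indices below len that are ≡ r (mod n), cast
theorem pyRange_eq_filter_range (r n len : Nat) (hr : r < n) :
    PySem.List.pyRange (r : Int) (len : Int) (n : Int) =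
      List.map (fun i : Nat => (i : Int)) ((List.range len).filter (fun i => i % n == r)) := by
  have hn0 : 0 < n := by omega
  have hnI : (0 : Int) < (n : Int) := by exact_mod_cast hn0
  have hL : (PySem.List.pyRange (r : Int) (len : Int) (n : Int)).Pairwise (· < ·) := by
    rw [PySem.List.pyRange_of_pos _ _ hnI]
    refine List.Pairwise.map _ (fun a b hab => ?_) List.pairwise_lt_range
    have hab' : (a : Int) < b := by exact_mod_cast hab
    have := mul_lt_mul_of_pos_left hab' hnI
    linarith
  have hR : (List.map (fun i : Nat => (i : Int)) ((List.range len).filter (fun i => i % n == r))).Pairwise (· < ·) := by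
    refine List.Pairwise.map _ (fun a b hab => by exact_mod_cast hab) ?_
    exact List.Pairwise.sublist List.filter_sublist List.pairwise_lt_range
  have hmem : ∀ x, x ∈ PySem.List.pyRange (r : Int) (len : Int) (n : Int) ↔
      x ∈ List.map (fun i : Nat => (i : Int)) ((List.range len).filter (fun i => i % n == r)) := by
    intro x
    rw [PySem.List.mem_pyRange_iff_of_pos hnI]
    simp only [List.mem_map, List.mem_filter, List.mem_range, beq_iff_eq]
    constructor
    · rintro ⟨h1, h2, hdvd⟩
      have hx0 : 0 ≤ x := le_trans (by exact_mod_cast Nat.zero_le r) h1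
      have hme : (r : Int) ≡ x [ZMOD (n : Int)] := Int.modEq_iff_dvd.mpr hdvd
      have hxr : x % (n : Int) = (r : Int) := by
        rw [← hme]
        exact Int.emod_eq_of_lt (by exact_mod_cast Nat.zero_le r) (by exact_mod_cast hr)
      refine ⟨x.toNat, ⟨by omega, ?_⟩, by omega⟩
      have hcast : ((x.toNat % n : Nat) : Int) = (r : Int) := by
        push_cast
        rw [Int.toNat_of_nonneg hx0]
        exact hxr
      exact_mod_cast hcast
    · rintro ⟨i, ⟨hilen, himod⟩, rfl⟩
      have hd := Nat.div_add_mod i n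
      have hri : r ≤ i := himod ▸ Nat.mod_le i n
      refine ⟨by exact_mod_cast hri, by exact_mod_cast hilen, ⟨(i / n : Nat), ?_⟩⟩
      have heq : n * (i / n) + r = i := by rw [himod] at hd; exact hd
      calc (i : Int) - (r : Int) = ((n * (i / n) + r : Nat) : Int) - (r : Int) := by rw [heq]
        _ = (n : Int) * ((i / n : Nat) : Int) := by push_cast; ring
  have hperm : (PySem.List.pyRange (r : Int) (len : Int) (n : Int)).Perm
      (List.map (fun i : Nat => (i : Int)) ((List.range len).filter (fun i => i % n == r))) :=
    (List.perm_ext_iff_of_nodup (hL.imp (fun h => ne_of_lt h)) (hR.imp (fun h => ne_of_lt h))).mpr hmem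
  exact List.eq_of_perm_of_sorted (fun a b _ _ hab hba => le_antisymm hab hba)
    (hL.imp (fun h => le_of_lt h)) (hR.imp (fun h => le_of_lt h)) hperm

-- A's inner scan at rank r is pvContrib
theorem map_pyGetD_filter_eq_pvContrib (n r : Nat) (files : List String) :
    List.map (fun i : Nat => PySem.List.pyGetD files (i : Int) "")
      ((List.range files.length).filter (fun i => i % n == r)) = pvContrib n files 0 r := by
  induction files using List.reverseRecOn with
  | nil => simp [pvContrib]
  | append_singleton xs x ih =>
    rw [List.length_append, List.length_singleton, List.range_succ, List.filter_append,
      List.map_append, pvContrib_snoc]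
    have h1 : List.map (fun i : Nat => PySem.List.pyGetD (xs ++ [x]) (i : Int) "")
        ((List.range xs.length).filter (fun i => i % n == r)) =
        List.map (fun i : Nat => PySem.List.pyGetD xs (i : Int) "")
        ((List.range xs.length).filter (fun i => i % n == r)) := by
      refine List.map_congr_left (fun i hi => ?_)
      have hilen : i < xs.length := List.mem_range.mp (List.mem_of_mem_filter hi)
      rw [PySem.List.pyGetD_natCast, PySem.List.pyGetD_natCast,
        List.getD_append _ _ _ _ hilen]
    rw [h1, ih, Nat.zero_add]
    by_cases h : xs.length % n = r
    · simp [List.filter, h, PySem.List.pyGetD_natCast]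
    · have hb : (xs.length % n == r) = false := by simp [h]
      simp [List.filter, hb, h]

theorem pv_filter_map_congr (n : Nat) (f g : Nat → List String)
    (h : ∀ r ∈ List.range n, f r = g r) :
    ((List.range n).filter (fun r => decide (f r ≠ []))).map f =
      ((List.range n).filter (fun r => decide (g r ≠ []))).map g := by
  rw [List.filter_congr (fun r hr => by rw [h r hr])]
  exact List.map_congr_left (fun r hr => h r (List.mem_filter.mp hr).1)

-- B's fold, in closed form
theorem foldl_enumerate_buckets (n : Nat) (xs : List String) (s : Nat) (bs : List (List String))
    (hlen : bs.length = n) :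
    (PySem.List.enumerate xs (s : Int)).foldl
      (fun bs p => bs.modify (PySem.Int.mod p.1 (n : Int)).toNat (fun b => b ++ [p.2])) bs =
      (List.range n).map (fun j => bs.getD j [] ++ pvContrib n xs s j) := by
  induction xs generalizing s bs with
  | nil =>
    simp only [PySem.List.enumerate_nil, List.foldl_nil, pvContrib, List.append_nil]
    refine List.ext_getElem (by simp [hlen]) (fun i h1 h2 => ?_)
    have hin : i < n := by simpa using h2
    simp [List.getD_eq_getElem?_getD, List.getElem?_eq_getElem h1]
  | cons x xs ih =>
    simp only [PySem.List.enumerate_cons, List.foldl_cons]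
    have hcast : (s : Int) + 1 = ((s + 1 : Nat) : Int) := by push_cast; ring
    rw [hcast, PySem.Int.mod_natCast, Int.toNat_natCast,
      ih (s + 1) _ (by rw [List.length_modify]; exact hlen)]
    refine List.map_congr_left (fun j hj => ?_)
    have hjn : j < n := List.mem_range.mp hj
    have hjb : j < bs.length := by omega
    have hgd : (bs.modify (s % n) (fun b => b ++ [x])).getD j [] =
        if s % n = j then bs.getD j [] ++ [x] else bs.getD j [] := by
      rw [List.getD_eq_getElem?_getD, List.getElem?_modify, List.getElem?_eq_getElem hjb]
      by_cases h : s % n = j <;>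
        simp [h, List.getD_eq_getElem?_getD, List.getElem?_eq_getElem hjb]
    rw [hgd, pvContrib]
    by_cases h : s % n = j <;> simp [h]

-- ===== VERDICT (by name: the statement is the Claim_ definition above) =====
theorem assign_files_to_processes_spec : Claim_equal_assign_files_to_processes := by
  intro files np _
  unfold Spec_assign_files_to_processes assign_files_to_processes assign_files_to_processes_alt
  by_cases hnp : np ≤ 0
  · simp [hnp, PySem.List.pyRange_one_eq_nil hnp]
  · rw [if_neg hnp]
    obtain ⟨n, rfl⟩ : ∃ n : Nat, np = (n : Int) := ⟨np.toNat, by omega⟩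
    have hn : 0 < n := by omega
    have hA : (PySem.List.pyRange 0 (n : Int) 1).foldl
        (fun acc rank =>
          let rank_files := (PySem.List.pyRange rank (PySem.List.len files) (n : Int)).map
            (fun i => PySem.List.pyGetD files i "")
          if rank_files ≠ [] then acc ++ [rank_files] else acc) [] =
        ((List.range n).filter (fun r => decide (pvContrib n files 0 r ≠ []))).map
          (fun r => pvContrib n files 0 r) := by
      simp only [PySem.List.foldl_append_ite
        (fun rank => (PySem.List.pyRange rank (PySem.List.len files) (n : Int)).map
          (fun i => PySem.List.pyGetD files i "") ≠ [])
        (fun rank => (PySem.List.pyRange rank (PySem.List.len files) (n : Int)).map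
          (fun i => PySem.List.pyGetD files i "")), List.nil_append]
      rw [PySem.List.pyRange_one, List.filter_map, List.map_map]
      simp only [Int.sub_zero, Int.toNat_natCast, zero_add]
      have hinner : ∀ r ∈ List.range n,
          (PySem.List.pyRange (r : Int) (PySem.List.len files) (n : Int)).map
            (fun i => PySem.List.pyGetD files i "") = pvContrib n files 0 r := by
        intro r hr
        rw [PySem.List.len_eq, pyRange_eq_filter_range r n files.length (List.mem_range.mp hr),
          List.map_map]
        exact map_pyGetD_filter_eq_pvContrib n r files
      simp only [Function.comp_def]
      exact pv_filter_map_congr n _ _ hinner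
    rw [hA]
    have h0 : (0 : Int) = ((0 : Nat) : Int) := rfl
    have hB := foldl_enumerate_buckets n files 0 (List.replicate n ([] : List String))
      (List.length_replicate)
    simp only [Int.toNat_natCast]
    rw [h0, hB]
    have hrepl : (List.range n).map
        (fun j => (List.replicate n ([] : List String)).getD j [] ++ pvContrib n files 0 j) =
        (List.range n).map (fun j => pvContrib n files 0 j) :=
      List.map_congr_left (fun j hj => by
        have hjn : j < n := List.mem_range.mp hj
        simp [List.getD_eq_getElem?_getD, hjn])
    rw [hrepl, List.filter_map]
    simp only [Function.comp_def]
    refine congrArg _ (List.filter_congr ?_)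
    intro r _
    cases pvContrib n files 0 r <;> simp
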